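-- pv_equiv track=rewrite | github.com/polsala/SPD01CryptYourMomma | utils/matrix_operations.py | create_dict_mapping_from_iterable
-- ===== SOURCE A (Python) =====
-- from collections.abc import Iterable
--
-- def create_matrix_from_iterable(n_rows, n_columns, iterable_l):
--     if not isinstance(iterable_l, Iterable):
--         raise Exception('You passed a non iterable!')
--
--     iterable_l = list(iterable_l)
--
--     if n_rows * n_columns != len(iterable_l):
--         raise Exception('That\s not possible ma friend %s X %s != %s' % (n_rows, n_columns, iterable_l))
--
--     return list(zip(*[iter(iterable_l)]*n_columns))
--
-- def create_dict_mapping_from_iterable(rows_code_list, columns_code_list, iterable_l):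
--     if not isinstance(rows_code_list, Iterable) or not isinstance(columns_code_list, Iterable):
--         raise Exception('You passed a non iterable as rows or columns code list!')
--
--     rows_code_list = list(rows_code_list)
--     columns_code_list = list(columns_code_list)
--
--     n_rows = len(rows_code_list)
--     n_columns = len(columns_code_list)
--
--     list_of_tuples = create_matrix_from_iterable(n_rows, n_columns, iterable_l)
--
--     res_dict = {}
--
--     for i in range(0, n_rows):
--         for j in range(0, n_columns):
--             values_to_be_mapped = list_of_tuples[i][j]
--             values_to_be_mapped = list(values_to_be_mapped)
--             for unit_value in values_to_be_mapped:
--                 res_dict[unit_value] = (rows_code_list[i], columns_code_list[j])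
--
--     return res_dict
-- ===== SOURCE B (Python) =====
-- from collections.abc import Iterable
--
-- def create_dict_mapping_from_iterable(rows_code_list, columns_code_list, iterable_l):
--     if not isinstance(rows_code_list, Iterable) or not isinstance(columns_code_list, Iterable):
--         raise Exception('You passed a non iterable as rows or columns code list!')
--     if not isinstance(iterable_l, Iterable):
--         raise Exception('You passed a non iterable!')
--
--     rows_code_list = list(rows_code_list)
--     columns_code_list = list(columns_code_list)
--     iterable_l = list(iterable_l)
--
--     n_rows = len(rows_code_list)
--     n_columns = len(columns_code_list)
--
--     if n_rows * n_columns != len(iterable_l):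
--         raise Exception('That\s not possible ma friend %s X %s != %s' % (n_rows, n_columns, iterable_l))
--
--     res_dict = {}
--     for k, values_to_be_mapped in enumerate(iterable_l):
--         i, j = divmod(k, n_columns)
--         for unit_value in values_to_be_mapped:
--             res_dict[unit_value] = (rows_code_list[i], columns_code_list[j])
--     return res_dict
-- ===== Notes on version B (the rewrite author's own statement) =====
-- stated objective: simpler
-- what changed: B drops the intermediate matrix helper and the nested row/column loops, doing one enumerate pass over the flat list with divmod(k, n_columns) giving the row/column codes directly.
import Mathlib
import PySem

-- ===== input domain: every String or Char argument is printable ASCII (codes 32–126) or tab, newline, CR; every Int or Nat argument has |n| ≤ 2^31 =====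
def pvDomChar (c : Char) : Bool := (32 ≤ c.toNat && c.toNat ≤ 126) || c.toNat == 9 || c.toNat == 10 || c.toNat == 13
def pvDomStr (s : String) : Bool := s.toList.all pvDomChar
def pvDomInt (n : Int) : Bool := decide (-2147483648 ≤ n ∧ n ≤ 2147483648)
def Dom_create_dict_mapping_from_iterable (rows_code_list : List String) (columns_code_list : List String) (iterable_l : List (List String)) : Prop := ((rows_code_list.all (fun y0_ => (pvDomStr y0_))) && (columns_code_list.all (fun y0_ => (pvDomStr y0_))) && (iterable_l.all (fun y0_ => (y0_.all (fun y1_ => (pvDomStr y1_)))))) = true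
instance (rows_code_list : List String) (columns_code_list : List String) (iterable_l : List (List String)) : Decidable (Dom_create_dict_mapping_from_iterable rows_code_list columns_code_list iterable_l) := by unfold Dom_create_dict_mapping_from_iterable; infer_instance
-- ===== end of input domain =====

-- B replaces the build-matrix-then-double-loop of A by a single enumerate pass with divmod;
-- equivalence of the returned dict (as an ordered association list) is proved on Pre_ (the
-- inputs where A's length check passes, i.e. where A returns instead of raising).

-- ===== PORT A =====
-- zip(*[iter(l)]*n): successive chunks of size n, dropping an incomplete final chunk (n = 0 gives []).
def pvZipChunks (n : Nat) (l : List (List String)) : List (List (List String)) :=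
  if h : n = 0 ∨ l.length < n then []
  else (l.take n) :: pvZipChunks n (l.drop n)
  termination_by l.length
  decreasing_by push_neg at h; simp only [List.length_drop]; omega

-- create_matrix_from_iterable, transliterated (the Iterable guard is vacuous for a List argument;
-- the length-mismatch 'raise' is the case excluded by Pre_ below).
def create_matrix_from_iterable (n_rows : Nat) (n_columns : Nat) (iterable_l : List (List String)) : List (List (List String)) :=
  let _ := n_rows
  pvZipChunks n_columns iterable_l

-- indices i, j come from range(n_rows)/range(n_columns) and are always in range, so getD is exact here
def create_dict_mapping_from_iterable (rows_code_list : List String) (columns_code_list : List String) (iterable_l : List (List String)) : List (String × String × String) :=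
  let n_rows := rows_code_list.length
  let n_columns := columns_code_list.length
  let list_of_tuples := create_matrix_from_iterable n_rows n_columns iterable_l
  let res_dict : PySem.Dict String (String × String) :=
    (List.range n_rows).foldl (fun d i =>
      (List.range n_columns).foldl (fun d j =>
        let values_to_be_mapped := (list_of_tuples.getD i []).getD j []
        values_to_be_mapped.foldl (fun d unit_value =>
          d.insert unit_value (rows_code_list.getD i "", columns_code_list.getD j "")) d) d)
      PySem.Dict.empty
  res_dict.items

-- ===== PORT B =====
def create_dict_mapping_from_iterable_alt (rows_code_list : List String) (columns_code_list : List String) (iterable_l : List (List String)) : List (String × String × String) :=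
  let n_columns : Int := (columns_code_list.length : Int)
  let res_dict : PySem.Dict String (String × String) :=
    (PySem.List.enumerate iterable_l 0).foldl (fun d kv =>
      let i := PySem.Int.floordiv kv.1 n_columns
      let j := PySem.Int.mod kv.1 n_columns
      kv.2.foldl (fun d unit_value =>
        d.insert unit_value (PySem.List.pyGetD rows_code_list i "", PySem.List.pyGetD columns_code_list j "")) d)
      PySem.Dict.empty
  res_dict.items

-- ===== PRECONDITION & SPEC =====
-- Pre_ excludes exactly the inputs where A raises its length-mismatch Exception
-- (n_rows * n_columns != len(iterable_l)); A returns on every other input of the type.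
def Pre_create_dict_mapping_from_iterable (rows_code_list : List String) (columns_code_list : List String) (iterable_l : List (List String)) : Prop :=
  rows_code_list.length * columns_code_list.length = iterable_l.length
instance (rows_code_list : List String) (columns_code_list : List String) (iterable_l : List (List String)) : Decidable (Pre_create_dict_mapping_from_iterable rows_code_list columns_code_list iterable_l) := by unfold Pre_create_dict_mapping_from_iterable; infer_instance

def pvWitness_create_dict_mapping_from_iterable : List String × List String × List (List String) :=
  (["r1", "r2"], ["c1", "c2"], [["a"], ["b", "e"], [], ["d"]])

def Spec_create_dict_mapping_from_iterable (rows_code_list : List String) (columns_code_list : List String) (iterable_l : List (List String)) (out : List (String × String × String)) : Prop := out = create_dict_mapping_from_iterable_alt rows_code_list columns_code_list iterable_l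
instance (rows_code_list : List String) (columns_code_list : List String) (iterable_l : List (List String)) (out : List (String × String × String)) : Decidable (Spec_create_dict_mapping_from_iterable rows_code_list columns_code_list iterable_l out) := by unfold Spec_create_dict_mapping_from_iterable; infer_instance

-- ===== CLAIM (what is proved, stated in full; the proofs are below) =====
def Claim_equal_create_dict_mapping_from_iterable : Prop := ∀ (rows_code_list : List String) (columns_code_list : List String) (iterable_l : List (List String)), Dom_create_dict_mapping_from_iterable rows_code_list columns_code_list iterable_l → Pre_create_dict_mapping_from_iterable rows_code_list columns_code_list iterable_l → Spec_create_dict_mapping_from_iterable rows_code_list columns_code_list iterable_l (create_dict_mapping_from_iterable rows_code_list columns_code_list iterable_l)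

-- ===== LEMMAS AND PROOFS =====

-- the common middle form: one pass over the flat list with a running index k
def pvMFold (rows cols : List String) (nc : Nat) : List (List String) → Nat → PySem.Dict String (String × String) → PySem.Dict String (String × String)
  | [], _, d => d
  | vs :: rest, k, d =>
      pvMFold rows cols nc rest (k + 1)
        (vs.foldl (fun d v => d.insert v (rows.getD (k / nc) "", cols.getD (k % nc) "")) d)

theorem pvMFold_append (rows cols : List String) (nc : Nat) (xs ys : List (List String)) : ∀ (k : Nat) (d : PySem.Dict String (String × String)),
    pvMFold rows cols nc (xs ++ ys) k d
      = pvMFold rows cols nc ys (k + xs.length)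
          ((xs.zipIdx k).foldl (fun d p =>
            p.1.foldl (fun d v => d.insert v (rows.getD (p.2 / nc) "", cols.getD (p.2 % nc) "")) d) d) := by
  induction xs with
  | nil => intro k d; simp only [List.nil_append, List.zipIdx_nil, List.foldl_nil, List.length_nil, Nat.add_zero]
  | cons x xs ih =>
      intro k d
      simp only [List.cons_append, pvMFold, List.zipIdx_cons, List.foldl_cons, ih, List.length_cons]
      ring_nf

theorem pv_foldl_congr {α β : Type} : ∀ (l : List α) (f g : β → α → β) (d : β),
    (∀ x ∈ l, ∀ acc, f acc x = g acc x) → l.foldl f d = l.foldl g d := by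
  intro l
  induction l with
  | nil => intro f g d _; rfl
  | cons x xs ih =>
      intro f g d h
      simp only [List.foldl_cons, h x (by simp)]
      exact ih f g _ (fun y hy acc => h y (by simp [hy]) acc)

theorem pv_foldl_id {α β : Type} : ∀ (l : List α) (d : β), l.foldl (fun d _ => d) d = d := by
  intro l
  induction l with
  | nil => intro d; rfl
  | cons x xs ih => intro d; exact ih d

-- fold over range' n xs.length reading xs.getD (j - n) = fold over xs.zipIdx n
theorem pv_foldl_range'_zipIdx {γ δ : Type} (dflt : γ) (f : δ → Nat → γ → δ) : ∀ (xs : List γ) (n : Nat) (d : δ),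
    (List.range' n xs.length).foldl (fun d j => f d j (xs.getD (j - n) dflt)) d
      = (xs.zipIdx n).foldl (fun d p => f d p.2 p.1) d := by
  intro xs
  induction xs with
  | nil => intro n d; simp
  | cons x xs ih =>
      intro n d
      simp only [List.length_cons, List.range'_succ, List.foldl_cons, List.zipIdx_cons,
        Nat.sub_self, List.getD_cons_zero]
      rw [pv_foldl_congr (List.range' (n + 1) xs.length)
        (fun d j => f d j ((x :: xs).getD (j - n) dflt))
        (fun d j => f d j (xs.getD (j - (n + 1)) dflt)) (f d n x)
        (by intro j hj acc
            have hn : n + 1 ≤ j := (List.mem_range'_1.mp hj).1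
            have hj' : j - n = (j - (n + 1)) + 1 := by omega
            simp only [hj', List.getD_cons_succ])]
      exact ih (n + 1) _

theorem pvZipChunks_nil (n : Nat) : pvZipChunks n [] = [] := by
  unfold pvZipChunks; simp

theorem pvZipChunks_step (n : Nat) (l : List (List String)) (h0 : n ≠ 0) (h : n ≤ l.length) :
    pvZipChunks n l = l.take n :: pvZipChunks n (l.drop n) := by
  conv_lhs => unfold pvZipChunks
  rw [dif_neg (by omega)]

theorem pvZipChunks_length (n : Nat) (h0 : n ≠ 0) : ∀ (m : Nat) (l : List (List String)), l.length = m * n →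
    (pvZipChunks n l).length = m := by
  intro m
  induction m with
  | zero =>
      intro l hl
      simp only [Nat.zero_mul] at hl
      simp [List.length_eq_zero_iff.mp hl, pvZipChunks_nil]
  | succ m ih =>
      intro l hl
      have hle : n ≤ l.length := by
        have := Nat.le_mul_of_pos_left n (show 0 < m + 1 by omega); omega
      rw [pvZipChunks_step n l h0 hle]
      simp only [List.length_cons]
      rw [ih (l.drop n) (by simp only [List.length_drop, hl, Nat.succ_mul]; omega)]

-- the inner column loop of A over one exact chunk equals the corresponding pvMFold segment
theorem pv_chunk_inner (rows cols : List String) (nc : Nat) (i0 : Nat) :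
    ∀ (chunk : List (List String)) (j0 : Nat) (d : PySem.Dict String (String × String)), j0 + chunk.length ≤ nc →
    (chunk.zipIdx j0).foldl (fun d p =>
        p.1.foldl (fun d v => d.insert v (rows.getD i0 "", cols.getD p.2 "")) d) d
      = (chunk.zipIdx (i0 * nc + j0)).foldl (fun d p =>
        p.1.foldl (fun d v => d.insert v (rows.getD (p.2 / nc) "", cols.getD (p.2 % nc) "")) d) d := by
  intro chunk
  induction chunk with
  | nil => intro j0 d _; simp
  | cons vs chunk ih =>
      intro j0 d hle
      simp only [List.zipIdx_cons, List.foldl_cons]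
      have hj : j0 < nc := by simp at hle; omega
      have hdiv : (i0 * nc + j0) / nc = i0 := by
        rw [Nat.add_comm, Nat.add_mul_div_right _ _ (by omega : 0 < nc), Nat.div_eq_of_lt hj]; omega
      have hmod : (i0 * nc + j0) % nc = j0 := by
        rw [Nat.add_comm, Nat.add_mul_mod_self_right, Nat.mod_eq_of_lt hj]
      rw [hdiv, hmod]
      have := ih (j0 + 1) (vs.foldl (fun d v => d.insert v (rows.getD i0 "", cols.getD j0 "")) d)
        (by simp at hle ⊢; omega)
      rw [this]
      have harith : i0 * nc + j0 + 1 = i0 * nc + (j0 + 1) := by omega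
      rw [harith]

-- A's outer loop over the chunk list equals pvMFold on the flat list
theorem pv_chunks_fold (rows cols : List String) (nc : Nat) (h0 : nc ≠ 0) :
    ∀ (m : Nat) (l : List (List String)) (i0 : Nat) (d : PySem.Dict String (String × String)), l.length = m * nc →
    ((pvZipChunks nc l).zipIdx i0).foldl (fun d p =>
        (List.range nc).foldl (fun d j =>
          (p.1.getD j []).foldl (fun d v => d.insert v (rows.getD p.2 "", cols.getD j "")) d) d) d
      = pvMFold rows cols nc l (i0 * nc) d := by
  intro m
  induction m with
  | zero =>
      intro l i0 d hl
      simp only [Nat.zero_mul] at hl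
      simp [List.length_eq_zero_iff.mp hl, pvZipChunks_nil, pvMFold]
  | succ m ih =>
      intro l i0 d hl
      have hnc : nc ≤ l.length := by
        have := Nat.le_mul_of_pos_left nc (show 0 < m + 1 by omega); omega
      rw [pvZipChunks_step nc l h0 hnc]
      simp only [List.zipIdx_cons, List.foldl_cons]
      have htl : (l.take nc).length = nc := by simp only [List.length_take]; omega
      -- rewrite the inner range-fold over the exact chunk
      have hinner : ∀ d' : PySem.Dict String (String × String),
          (List.range nc).foldl (fun d j =>
            ((l.take nc).getD j []).foldl (fun d v => d.insert v (rows.getD i0 "", cols.getD j "")) d) d'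
          = ((l.take nc).zipIdx (i0 * nc)).foldl (fun d p =>
            p.1.foldl (fun d v => d.insert v (rows.getD (p.2 / nc) "", cols.getD (p.2 % nc) "")) d) d' := by
        intro d'
        have := pv_foldl_range'_zipIdx ([] : List String)
          (fun d j c => c.foldl (fun d v => d.insert v (rows.getD i0 "", cols.getD j "")) d)
          (l.take nc) 0 d'
        simp only [htl, List.range_eq_range', Nat.sub_zero] at this ⊢
        rw [this]
        have := pv_chunk_inner rows cols nc i0 (l.take nc) 0 d' (by omega)
        simpa using this
      rw [hinner]
      rw [ih (l.drop nc) (i0 + 1) _ (by simp only [List.length_drop, hl, Nat.succ_mul]; omega)]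
      have : l = l.take nc ++ l.drop nc := by simp
      conv_rhs => rw [this]
      rw [pvMFold_append]
      rw [htl]
      ring_nf

-- B's enumerate fold equals pvMFold
theorem pv_alt_fold (rows cols : List String) (nc : Nat) :
    ∀ (l : List (List String)) (k0 : Nat) (d : PySem.Dict String (String × String)),
    (PySem.List.enumerate l (k0 : Int)).foldl (fun d kv =>
        kv.2.foldl (fun d v =>
          d.insert v (PySem.List.pyGetD rows (PySem.Int.floordiv kv.1 (nc : Int)) "",
                      PySem.List.pyGetD cols (PySem.Int.mod kv.1 (nc : Int)) "")) d) d
      = pvMFold rows cols nc l k0 d := by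
  intro l
  induction l with
  | nil => intro k0 d; simp [PySem.List.enumerate_nil, pvMFold]
  | cons vs rest ih =>
      intro k0 d
      rw [PySem.List.enumerate_cons]
      simp only [List.foldl_cons, pvMFold]
      have hcast : ((k0 : Int) + 1) = ((k0 + 1 : Nat) : Int) := by push_cast; ring
      rw [hcast, ih (k0 + 1)]
      congr 1
      simp only [PySem.Int.floordiv_natCast, PySem.Int.mod_natCast, PySem.List.pyGetD_natCast]  -- Int divmod/index on k ≥ 0 is Nat div/mod/getD

-- ===== VERDICT (by name: the statement is the Claim_ definition above) =====
theorem create_dict_mapping_from_iterable_spec : Claim_equal_create_dict_mapping_from_iterable := by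
  intro rows cols l _ hpre
  unfold Spec_create_dict_mapping_from_iterable
  simp only [create_dict_mapping_from_iterable, create_dict_mapping_from_iterable_alt,
    create_matrix_from_iterable]
  unfold Pre_create_dict_mapping_from_iterable at hpre
  congr 1
  have halt := pv_alt_fold rows cols cols.length l 0 PySem.Dict.empty
  simp only [Nat.cast_zero] at halt
  rw [halt]
  by_cases h0 : cols.length = 0
  · -- nc = 0 forces l = []; A's inner loop is empty, so the outer fold is the identity
    have hl : l = [] := by
      rw [h0, Nat.mul_zero] at hpre
      exact List.length_eq_zero_iff.mp hpre.symm
    subst hl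
    simp only [h0, List.range_zero, List.foldl_nil, pvMFold]
    rw [pv_foldl_id]
  · have hlen : (pvZipChunks cols.length l).length = rows.length :=
      pvZipChunks_length cols.length h0 rows.length l hpre.symm
    have := pv_foldl_range'_zipIdx ([] : List (List String))
      (fun d i c => (List.range cols.length).foldl (fun d j =>
        (c.getD j []).foldl (fun d v => d.insert v (rows.getD i "", cols.getD j "")) d) d)
      (pvZipChunks cols.length l) 0 PySem.Dict.empty
    simp only [hlen, List.range_eq_range', Nat.sub_zero] at this
    simp only [List.range_eq_range']
    rw [this]
    have h2 := pv_chunks_fold rows cols cols.length h0 rows.length l 0 PySem.Dict.empty hpre.symm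
    simp only [List.range_eq_range'] at h2
    simpa using h2
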